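-- pv_equiv track=rewrite | github.com/naizhengtan/CobraSAT | src/formula/dimacs.py | make_clause_lines
-- ===== SOURCE A (Python) =====
-- def make_clause_lines(cnf):
--     seen = {}
--     var_count = 0
--     clause_lines = []
--
--     for clause in cnf:
--         line = []
--         for name, is_positive in clause:
--             if name not in seen:
--                 var_count += 1
--                 seen[name] = var_count
--             num = str(seen[name] if is_positive else -seen[name])
--             line.append(num)
--         line.append(str(0))
--         clause_lines.append(' '.join(line))
--
--     return clause_lines, var_count
-- ===== SOURCE B (Python) =====
-- def make_clause_lines(cnf):
--     # pass 1: assign consecutive numbers to variables in first-appearance order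
--     seen = {}
--     for clause in cnf:
--         for name, _ in clause:
--             if name not in seen:
--                 seen[name] = len(seen) + 1
--     var_count = len(seen)
--     # pass 2: format every clause through the completed mapping
--     clause_lines = [
--         ' '.join([str(seen[name] if is_positive else -seen[name])
--                   for name, is_positive in clause] + ['0'])
--         for clause in cnf
--     ]
--     return clause_lines, var_count
-- ===== Notes on version B (the rewrite author's own statement) =====
-- stated objective: alternative
-- what changed: B splits A's single interleaved loop into two passes: a numbering pass that only builds the first-appearance variable map (deriving the count from the dict size instead of a separate counter), then a pure formatting pass of list comprehensions that maps each literal through the completed dict.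
import Mathlib
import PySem

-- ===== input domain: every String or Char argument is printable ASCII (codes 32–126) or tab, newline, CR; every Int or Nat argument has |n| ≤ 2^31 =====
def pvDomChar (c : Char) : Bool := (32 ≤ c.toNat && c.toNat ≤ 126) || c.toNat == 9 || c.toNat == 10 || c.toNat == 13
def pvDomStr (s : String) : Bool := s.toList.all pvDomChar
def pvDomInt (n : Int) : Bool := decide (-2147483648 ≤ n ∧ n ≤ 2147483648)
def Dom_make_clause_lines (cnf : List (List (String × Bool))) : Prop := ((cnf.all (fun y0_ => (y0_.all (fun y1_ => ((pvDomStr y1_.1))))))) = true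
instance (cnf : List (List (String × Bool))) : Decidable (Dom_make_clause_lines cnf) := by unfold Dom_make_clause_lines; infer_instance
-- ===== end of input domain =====

-- B does the same work in two passes (build the variable map, then format); equivalence is proved for the return value.


-- ===== PORT A =====
def pvStepLitA (st : PySem.Dict String Int × Int × List String) (lit : String × Bool) :
    PySem.Dict String Int × Int × List String :=
  if st.1.contains lit.1 then
    (st.1, st.2.1, st.2.2 ++ [PySem.Int.toStr (if lit.2 then st.1.getD lit.1 0 else -(st.1.getD lit.1 0))])
  else
    let seen' := st.1.insert lit.1 (st.2.1 + 1)
    (seen', st.2.1 + 1, st.2.2 ++ [PySem.Int.toStr (if lit.2 then seen'.getD lit.1 0 else -(seen'.getD lit.1 0))])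

def pvStepClauseA (st : PySem.Dict String Int × Int × List String) (clause : List (String × Bool)) :
    PySem.Dict String Int × Int × List String :=
  let r := clause.foldl pvStepLitA (st.1, st.2.1, ([] : List String))
  (r.1, r.2.1, st.2.2 ++ [PySem.Str.join " " (r.2.2 ++ [PySem.Int.toStr 0])])

def make_clause_lines (cnf : List (List (String × Bool))) : List String × Int :=
  let r := cnf.foldl pvStepClauseA (PySem.Dict.empty, 0, ([] : List String))
  (r.2.2, r.2.1)

-- ===== PORT B =====
def pvAddName (d : PySem.Dict String Int) (name : String) : PySem.Dict String Int :=
  if d.contains name then d else d.insert name ((d.size : Int) + 1)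

def pvBuildSeen (cnf : List (List (String × Bool))) : PySem.Dict String Int :=
  cnf.foldl (fun d clause => clause.foldl (fun d lit => pvAddName d lit.1) d) PySem.Dict.empty

def pvRenderLit (seen : PySem.Dict String Int) (lit : String × Bool) : String :=
  PySem.Int.toStr (if lit.2 then seen.getD lit.1 0 else -(seen.getD lit.1 0))

def pvRenderClause (seen : PySem.Dict String Int) (clause : List (String × Bool)) : String :=
  PySem.Str.join " " (clause.map (pvRenderLit seen) ++ [PySem.Int.toStr 0])

def make_clause_lines_alt (cnf : List (List (String × Bool))) : List String × Int :=
  let seen := pvBuildSeen cnf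
  (cnf.map (pvRenderClause seen), (seen.size : Int))

-- ===== PRECONDITION & SPEC =====
def Spec_make_clause_lines (cnf : List (List (String × Bool))) (out : List String × Int) : Prop := out = make_clause_lines_alt cnf
instance (cnf : List (List (String × Bool))) (out : List String × Int) : Decidable (Spec_make_clause_lines cnf out) := by unfold Spec_make_clause_lines; infer_instance

-- ===== CLAIM (what is proved, stated in full; the proofs are below) =====
def Claim_equal_make_clause_lines : Prop := ∀ (cnf : List (List (String × Bool))), Dom_make_clause_lines cnf → Spec_make_clause_lines cnf (make_clause_lines cnf)

-- ===== LEMMAS AND PROOFS =====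

-- d's entries are all present, with the same values, in D
def pvDExt (d D : PySem.Dict String Int) : Prop :=
  ∀ k v, d.get? k = some v → D.get? k = some v

theorem pvDExt_refl (d : PySem.Dict String Int) : pvDExt d d := fun _ _ h => h

theorem pvDExt_trans {a b c : PySem.Dict String Int} (h1 : pvDExt a b) (h2 : pvDExt b c) :
    pvDExt a c := fun k v h => h2 k v (h1 k v h)

theorem pvDExt_addName (d : PySem.Dict String Int) (name : String) :
    pvDExt d (pvAddName d name) := by
  intro k v h
  unfold pvAddName
  split
  · exact h
  · next hc =>
    rcases eq_or_ne k name with rfl | hne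
    · rw [PySem.Dict.contains_eq_isSome_get?, h] at hc; simp at hc
    · rw [PySem.Dict.get?_insert_of_ne _ _ hne]; exact h

theorem pvDExt_foldl_lits (c : List (String × Bool)) (d : PySem.Dict String Int) :
    pvDExt d (c.foldl (fun d lit => pvAddName d lit.1) d) := by
  induction c generalizing d with
  | nil => exact pvDExt_refl d
  | cons lit rest ih =>
    exact pvDExt_trans (pvDExt_addName d lit.1) (ih (pvAddName d lit.1))

theorem pvDExt_foldl_clauses (cnf : List (List (String × Bool))) (d : PySem.Dict String Int) :
    pvDExt d (cnf.foldl (fun d clause => clause.foldl (fun d lit => pvAddName d lit.1) d) d) := by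
  induction cnf generalizing d with
  | nil => exact pvDExt_refl d
  | cons c rest ih =>
    exact pvDExt_trans (pvDExt_foldl_lits c d) (ih _)

theorem pvGetD_agree {d D : PySem.Dict String Int} (hext : pvDExt d D) {k : String}
    (hc : d.contains k = true) : D.getD k 0 = d.getD k 0 := by
  rw [PySem.Dict.contains_eq_isSome_get?] at hc
  cases hg : d.get? k with
  | none => rw [hg] at hc; simp at hc
  | some v => simp [PySem.Dict.getD_eq_get?_getD, hg, hext k v hg]

theorem pvStepLitA_eq (d : PySem.Dict String Int) (cnt : Int) (line : List String)
    (lit : String × Bool) (D : PySem.Dict String Int) (hext : pvDExt (pvAddName d lit.1) D)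
    (hsz : (d.size : Int) = cnt) :
    pvStepLitA (d, cnt, line) lit
      = (pvAddName d lit.1, ((pvAddName d lit.1).size : Int), line ++ [pvRenderLit D lit]) := by
  have hc : (pvAddName d lit.1).contains lit.1 = true := by
    unfold pvAddName
    split
    · assumption
    · exact PySem.Dict.contains_insert_self _ _ _
  have hg : D.getD lit.1 0 = (pvAddName d lit.1).getD lit.1 0 := pvGetD_agree hext hc
  unfold pvStepLitA pvAddName pvRenderLit at *
  split
  · next h =>
    simp only [h, if_true] at hg ⊢
    rw [hg, hsz]
  · next h =>
    simp only [h, if_false, Bool.false_eq_true] at hg ⊢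
    rw [← hsz]
    rw [hg, PySem.Dict.size_insert]
    simp [h]

theorem pvInner (c : List (String × Bool)) (d : PySem.Dict String Int) (cnt : Int)
    (line : List String) (D : PySem.Dict String Int)
    (hsz : (d.size : Int) = cnt)
    (hext : pvDExt (c.foldl (fun d lit => pvAddName d lit.1) d) D) :
    c.foldl pvStepLitA (d, cnt, line)
      = (c.foldl (fun d lit => pvAddName d lit.1) d,
         ((c.foldl (fun d lit => pvAddName d lit.1) d).size : Int),
         line ++ c.map (pvRenderLit D)) := by
  induction c generalizing d cnt line with
  | nil => simp [hsz]
  | cons lit rest ih =>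
    simp only [List.foldl_cons] at hext ⊢
    have hext1 : pvDExt (pvAddName d lit.1) D :=
      pvDExt_trans (pvDExt_foldl_lits rest _) hext
    rw [pvStepLitA_eq d cnt line lit D hext1 hsz,
        ih (pvAddName d lit.1) _ _ rfl hext]
    simp

theorem pvOuter (cnf : List (List (String × Bool))) (d : PySem.Dict String Int) (cnt : Int)
    (lines : List String) (D : PySem.Dict String Int)
    (hsz : (d.size : Int) = cnt)
    (hext : pvDExt (cnf.foldl (fun d clause => clause.foldl (fun d lit => pvAddName d lit.1) d) d) D) :
    cnf.foldl pvStepClauseA (d, cnt, lines)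
      = (cnf.foldl (fun d clause => clause.foldl (fun d lit => pvAddName d lit.1) d) d,
         ((cnf.foldl (fun d clause => clause.foldl (fun d lit => pvAddName d lit.1) d) d).size : Int),
         lines ++ cnf.map (pvRenderClause D)) := by
  induction cnf generalizing d cnt lines with
  | nil => simp [hsz]
  | cons c rest ih =>
    simp only [List.foldl_cons] at hext ⊢
    have hext1 : pvDExt (c.foldl (fun d lit => pvAddName d lit.1) d) D :=
      pvDExt_trans (pvDExt_foldl_clauses rest _) hext
    have hstep : pvStepClauseA (d, cnt, lines) c
        = (c.foldl (fun d lit => pvAddName d lit.1) d,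
           ((c.foldl (fun d lit => pvAddName d lit.1) d).size : Int),
           lines ++ [pvRenderClause D c]) := by
      unfold pvStepClauseA
      rw [pvInner c d cnt [] D hsz hext1]
      simp [pvRenderClause]
    rw [hstep, ih _ _ _ rfl hext]
    simp

-- ===== VERDICT (by name: the statement is the Claim_ definition above) =====
theorem make_clause_lines_spec : Claim_equal_make_clause_lines := by
  intro cnf _
  unfold Spec_make_clause_lines make_clause_lines make_clause_lines_alt pvBuildSeen
  rw [pvOuter cnf PySem.Dict.empty 0 [] _ (by simp) (pvDExt_refl _)]
  simp
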